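-- pv_equiv track=rewrite | github.com/unworthyzeus/midi-to-vsqx | smart_matcher.py | _group_lyrics_by_word
-- ===== SOURCE A (Python) =====
-- from typing import List, Dict, Any, Optional, Tuple
--
-- def _group_lyrics_by_word(lyrics: List[Dict]) -> List[List[int]]:
--     """
--     Group lyrics by word boundaries
--     Returns list of lists, each containing indices of syllables in a word
--     """
--     if not lyrics:
--         return []
--
--     words = [[0]]
--
--     for i in range(1, len(lyrics)):
--         if lyrics[i].get('is_word_start', True):
--             words.append([i])
--         else:
--             words[-1].append(i)
--
--     return words
-- ===== SOURCE B (Python) =====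
-- def _group_lyrics_by_word(lyrics):
--     """
--     Group lyrics by word boundaries
--     Returns list of lists, each containing indices of syllables in a word
--     """
--     if not lyrics:
--         return []
--     starts = [0] \
--         + [i for i in range(1, len(lyrics)) if lyrics[i].get('is_word_start', True)] \
--         + [len(lyrics)]
--     return [list(range(a, b)) for a, b in zip(starts, starts[1:])]
-- ===== Notes on version B (the rewrite author's own statement) =====
-- stated objective: alternative
-- what changed: Replaces the single maintain-last-group pass (append to words[-1]) with a boundary-table construction: collect word-start indices, then partition [0, len) into ranges between consecutive boundaries via zip.
import Mathlib
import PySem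

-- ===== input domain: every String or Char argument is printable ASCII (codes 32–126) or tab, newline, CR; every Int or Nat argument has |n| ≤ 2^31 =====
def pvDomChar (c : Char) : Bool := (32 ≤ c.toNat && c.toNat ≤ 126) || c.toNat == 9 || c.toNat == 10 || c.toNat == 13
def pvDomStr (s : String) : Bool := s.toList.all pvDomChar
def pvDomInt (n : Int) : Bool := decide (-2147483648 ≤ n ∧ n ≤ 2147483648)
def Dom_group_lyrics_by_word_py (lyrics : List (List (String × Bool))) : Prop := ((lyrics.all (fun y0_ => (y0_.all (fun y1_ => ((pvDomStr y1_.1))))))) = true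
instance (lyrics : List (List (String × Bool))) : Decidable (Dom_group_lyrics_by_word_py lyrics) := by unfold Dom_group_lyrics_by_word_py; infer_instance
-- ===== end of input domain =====

-- B replaces A's maintain-last-group pass with a boundary table (word-start indices) that is
-- then partitioned into consecutive index ranges; same cost, different structure.

-- ===== PORT A =====
-- literal port of A: words = [[0]]; for i in range(1, len(lyrics)):
--   if lyrics[i].get('is_word_start', True): words.append([i]) else: words[-1].append(i)
def group_lyrics_by_word_py (lyrics : List (List (String × Bool))) : List (List Int) :=
  if lyrics.length = 0 then []
  else
    (PySem.List.pyRange 1 (lyrics.length : Int) 1).foldl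
      (fun words i =>
        if PySem.Dict.getD (PySem.Dict.mk (PySem.List.pyGetD lyrics i [])) "is_word_start" true then
          words ++ [[i]]
        else
          words.dropLast ++ [(words.getLast?.getD []) ++ [i]])
      [[0]]

-- ===== PORT B =====
-- literal port of Source B: starts = [0] + [i for i in range(1,len) if flag(i)] + [len];
-- result = [list(range(a,b)) for a, b in zip(starts, starts[1:])]  (starts[1:] = drop 1)
def group_lyrics_by_word_py_alt (lyrics : List (List (String × Bool))) : List (List Int) :=
  if lyrics.length = 0 then []
  else
    let starts : List Int :=
      ((0 : Int) :: (PySem.List.pyRange 1 (lyrics.length : Int) 1).filter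
        (fun i => PySem.Dict.getD (PySem.Dict.mk (PySem.List.pyGetD lyrics i [])) "is_word_start" true))
      ++ [(lyrics.length : Int)]
    (starts.zip (starts.drop 1)).map (fun p => PySem.List.pyRange p.1 p.2 1)

-- ===== PRECONDITION & SPEC =====
def Spec_group_lyrics_by_word_py (lyrics : List (List (String × Bool))) (out : List (List Int)) : Prop := out = group_lyrics_by_word_py_alt lyrics
instance (lyrics : List (List (String × Bool))) (out : List (List Int)) : Decidable (Spec_group_lyrics_by_word_py lyrics out) := by unfold Spec_group_lyrics_by_word_py; infer_instance

-- ===== CLAIM (what is proved, stated in full; the proofs are below) =====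
def Claim_equal_group_lyrics_by_word_py : Prop := ∀ (lyrics : List (List (String × Bool))), Dom_group_lyrics_by_word_py lyrics → Spec_group_lyrics_by_word_py lyrics (group_lyrics_by_word_py lyrics)

-- ===== LEMMAS AND PROOFS =====

-- partition a boundary list into the ranges between consecutive boundaries (B's zip-map step)
def pvPart (s : List Int) : List (List Int) :=
  (s.zip (s.drop 1)).map (fun p => PySem.List.pyRange p.1 p.2 1)

theorem pvPart_cons_cons (x y : Int) (r : List Int) :
    pvPart (x :: y :: r) = PySem.List.pyRange x y 1 :: pvPart (y :: r) := rfl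

theorem pvPart_concat (xs : List Int) (a b : Int) :
    pvPart (xs ++ [a, b]) = pvPart (xs ++ [a]) ++ [PySem.List.pyRange a b 1] := by
  induction xs with
  | nil => rfl
  | cons x xs ih =>
    cases xs with
    | nil => rfl
    | cons y ys =>
      simp only [List.cons_append] at *
      rw [pvPart_cons_cons, pvPart_cons_cons, ih, List.cons_append]

-- A's single pass over range(1, n) computes B's partition of the boundary table
theorem pvInv (f : Int → Bool) (n : Nat) (h : 1 ≤ n) :
    (PySem.List.pyRange 1 (n : Int) 1).foldl
      (fun words i =>
        if f i then words ++ [[i]]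
        else words.dropLast ++ [(words.getLast?.getD []) ++ [i]]) [[0]]
    = pvPart (((0 : Int) :: (PySem.List.pyRange 1 (n : Int) 1).filter f) ++ [(n : Int)]) := by
  induction n with
  | zero => omega
  | succ n ih =>
    by_cases h1 : 1 ≤ n
    · have hn1 : (1 : Int) ≤ (n : Int) := by exact_mod_cast h1
      have hr : PySem.List.pyRange 1 ((n + 1 : Nat) : Int) 1
          = PySem.List.pyRange 1 (n : Int) 1 ++ [(n : Int)] := by
        push_cast
        exact PySem.List.pyRange_one_succ_right hn1
      have hcast : (((n + 1 : Nat)) : Int) = (n : Int) + 1 := by push_cast; ring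
      rw [hr, List.foldl_append, List.filter_append, ih h1, hcast]
      by_cases hf : f (n : Int)
      · simp only [List.foldl_cons, List.foldl_nil, hf, if_pos, List.filter_cons, List.filter_nil]
        have : ((0 : Int) :: (((PySem.List.pyRange 1 (n : Int) 1).filter f) ++ [(n : Int)])) ++ [(n : Int) + 1]
            = (((0 : Int) :: (PySem.List.pyRange 1 (n : Int) 1).filter f)) ++ [(n : Int), (n : Int) + 1] := by
          simp
        rw [this, pvPart_concat, PySem.List.pyRange_one_singleton]
      · simp only [List.foldl_cons, List.foldl_nil, hf, if_neg, Bool.false_eq_true,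
          not_false_iff, List.filter_cons, List.filter_nil, List.append_nil]
        -- decompose the nonempty boundary list as xs ++ [a]
        set F := (PySem.List.pyRange 1 (n : Int) 1).filter f with hF
        have hne : ((0 : Int) :: F) ≠ [] := by simp
        obtain ⟨xs, a, hd⟩ : ∃ xs a, (0 : Int) :: F = xs ++ [a] :=
          ⟨((0 : Int) :: F).dropLast, ((0 : Int) :: F).getLast hne,
            (List.dropLast_append_getLast hne).symm⟩
        have ha_le : a ≤ (n : Int) := by
          have hmem : a ∈ (0 : Int) :: F := by rw [hd]; simp
          rcases List.mem_cons.mp hmem with h0 | hMem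
          · omega
          · have := (PySem.List.mem_pyRange_one).mp (List.mem_of_mem_filter hMem)
            omega
        have e1 : ((0 : Int) :: F) ++ [(n : Int)] = xs ++ [a, (n : Int)] := by
          rw [hd]; simp
        have e2 : ((0 : Int) :: F) ++ [(n : Int) + 1] = xs ++ [a, (n : Int) + 1] := by
          rw [hd]; simp
        rw [e1, e2, pvPart_concat, pvPart_concat]
        rw [PySem.List.pyRange_one_succ_right ha_le]
        simp
    · have hn0 : n = 0 := by omega
      subst hn0
      have h1 : PySem.List.pyRange 1 ((1 : Nat) : Int) 1 = [] :=
        PySem.List.pyRange_one_eq_nil (by norm_num)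
      rw [h1]
      simp only [List.foldl_nil, List.filter_nil]
      decide

-- ===== VERDICT (by name: the statement is the Claim_ definition above) =====
theorem group_lyrics_by_word_py_spec : Claim_equal_group_lyrics_by_word_py := by
  intro lyrics _
  unfold Spec_group_lyrics_by_word_py group_lyrics_by_word_py group_lyrics_by_word_py_alt
  by_cases hlen : lyrics.length = 0
  · simp [hlen]
  · have h1 : 1 ≤ lyrics.length := Nat.one_le_iff_ne_zero.mpr hlen
    simp only [hlen, if_false]
    exact pvInv
      (fun i => PySem.Dict.getD (PySem.Dict.mk (PySem.List.pyGetD lyrics i [])) "is_word_start" true)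
      lyrics.length h1
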